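-- pv_equiv track=rewrite | github.com/adnanyaqoobvirk/leetcode | 2089-find-target-indices-after-sorting-array/2089-find-target-indices-after-sorting-array.py | targetIndices
-- ===== SOURCE A (Python) =====
-- from typing import List
--
-- def targetIndices(nums: List[int], target: int) -> List[int]:
--     smaller = 0
--     equals = 0
--     for num in nums:
--         if num < target:
--             smaller += 1
--         elif num == target:
--             equals += 1
--     return [i for i in range(smaller, smaller + equals)]
-- ===== SOURCE B (Python) =====
-- def targetIndices(nums, target):
--     res = []
--     for i, v in enumerate(sorted(nums)):
--         if v == target:
--             res.append(i)
--     return res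
-- ===== Notes on version B (the rewrite author's own statement) =====
-- stated objective: alternative
-- what changed: B materialises the sorted copy with sorted() and collects the matching indices by scanning it with enumerate, instead of A's arithmetic construction of the index block from smaller/equal counts.
import Mathlib
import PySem

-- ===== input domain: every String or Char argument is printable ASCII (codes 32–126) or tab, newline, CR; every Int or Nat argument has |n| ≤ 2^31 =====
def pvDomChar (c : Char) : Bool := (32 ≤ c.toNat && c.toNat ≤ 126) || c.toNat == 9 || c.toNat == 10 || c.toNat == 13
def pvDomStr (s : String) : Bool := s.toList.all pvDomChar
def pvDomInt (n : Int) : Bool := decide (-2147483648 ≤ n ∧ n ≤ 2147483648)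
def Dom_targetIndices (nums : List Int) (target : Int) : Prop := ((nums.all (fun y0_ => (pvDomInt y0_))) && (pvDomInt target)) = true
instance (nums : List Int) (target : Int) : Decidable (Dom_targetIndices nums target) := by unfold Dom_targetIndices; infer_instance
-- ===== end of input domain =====

-- B materialises the sorted copy and scans it with enumerate for indices equal to target,
-- instead of A's arithmetic construction of the index block from smaller/equal counts (alternative decomposition).


-- ===== PORT A =====
-- for-loop over nums maintaining (smaller, equals), then [i for i in range(smaller, smaller+equals)]
def targetIndices (nums : List Int) (target : Int) : List Int :=
  let se := nums.foldl
    (fun (p : Int × Int) num =>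
      if num < target then (p.1 + 1, p.2)
      else if num = target then (p.1, p.2 + 1)
      else p) (0, 0)
  (PySem.List.pyRange se.1 (se.1 + se.2) 1).map (fun i => i)

-- ===== PORT B =====
-- res = []; for i, v in enumerate(sorted(nums)): if v == target: res.append(i); return res
def targetIndices_alt (nums : List Int) (target : Int) : List Int :=
  (PySem.List.enumerate (PySem.List.sorted nums (fun x => x) false) 0).foldl
    (fun res p => if p.2 = target then res ++ [p.1] else res) []

-- ===== PRECONDITION & SPEC =====
def Spec_targetIndices (nums : List Int) (target : Int) (out : List Int) : Prop := out = targetIndices_alt nums target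
instance (nums : List Int) (target : Int) (out : List Int) : Decidable (Spec_targetIndices nums target out) := by unfold Spec_targetIndices; infer_instance

-- ===== CLAIM (what is proved, stated in full; the proofs are below) =====
def Claim_equal_targetIndices : Prop := ∀ (nums : List Int) (target : Int), Dom_targetIndices nums target → Spec_targetIndices nums target (targetIndices nums target)

-- ===== LEMMAS AND PROOFS =====

-- A's counting loop computes the two counts.
theorem foldl_counts (t : Int) (nums : List Int) (s e : Int) :
    nums.foldl (fun (p : Int × Int) num =>
      if num < t then (p.1 + 1, p.2)
      else if num = t then (p.1, p.2 + 1)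
      else p) (s, e)
    = (s + (nums.countP (fun x => decide (x < t)) : Int),
       e + (nums.countP (fun x => decide (x = t)) : Int)) := by
  induction nums generalizing s e with
  | nil => simp
  | cons x xs ih =>
    simp only [List.foldl_cons, List.countP_cons]
    by_cases h1 : x < t
    · have h2 : ¬ x = t := by omega
      simp [h1, h2, ih]; omega
    · by_cases h2 : x = t
      · simp [h1, h2, ih]; omega
      · simp [h1, h2, ih]

-- In a ≤-sorted list, the indices (from start i) of the elements equal to t form the
-- contiguous block of length (count =t) beginning at i + (count <t).
theorem sorted_block (t : Int) (s : List Int) (h : s.Pairwise (· ≤ ·)) (i : Int) :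
    ((PySem.List.enumerate s i).filter (fun p => decide (p.2 = t))).map (fun p => p.1)
    = PySem.List.pyRange (i + (s.countP (fun x => decide (x < t)) : Int))
        (i + (s.countP (fun x => decide (x < t)) : Int) + (s.countP (fun x => decide (x = t)) : Int)) 1 := by
  induction s generalizing i with
  | nil =>
    simp [PySem.List.enumerate_nil, PySem.List.pyRange_one_eq_nil]
  | cons x xs ih =>
    have hx : ∀ y ∈ xs, x ≤ y := (List.pairwise_cons.mp h).1
    have hxs : xs.Pairwise (· ≤ ·) := (List.pairwise_cons.mp h).2
    rw [PySem.List.enumerate_cons]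
    simp only [List.filter_cons, List.countP_cons]
    by_cases h2 : x = t
    · have h1 : ¬ x < t := by omega
      have hlt0 : xs.countP (fun y => decide (y < t)) = 0 := by
        rw [List.countP_eq_zero]; intro y hy; have := hx y hy; simp; omega
      simp only [h2, hlt0, decide_true, if_true, List.map_cons]
      rw [PySem.List.pyRange_one_cons (by push_cast; omega), ih hxs]
      simp [hlt0]
      congr 1
      ring
    · by_cases h1 : x < t
      · simp only [h2, h1, decide_true, decide_false, if_true, Bool.false_eq_true, if_false]
        rw [ih hxs]
        congr 1 <;> push_cast <;> ring
      · have hlt0 : xs.countP (fun y => decide (y < t)) = 0 := by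
          rw [List.countP_eq_zero]; intro y hy; have := hx y hy; simp; omega
        have heq0 : xs.countP (fun y => decide (y = t)) = 0 := by
          rw [List.countP_eq_zero]; intro y hy; have := hx y hy; simp; omega
        simp only [h2, h1, hlt0, heq0, decide_false, Bool.false_eq_true, if_false]
        rw [ih hxs, hlt0, heq0]
        norm_num

-- ===== VERDICT (by name: the statement is the Claim_ definition above) =====
theorem targetIndices_spec : Claim_equal_targetIndices := by
  intro nums target _
  unfold Spec_targetIndices targetIndices targetIndices_alt
  have hfold := PySem.List.foldl_append_if (fun p : Int × Int => decide (p.2 = target))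
    (fun p => p.1) (PySem.List.enumerate (PySem.List.sorted nums (fun x => x) false) 0) []
  simp only [decide_eq_true_eq] at hfold
  rw [hfold, List.nil_append,
    sorted_block target _ (PySem.List.sorted_pairwise nums (fun x => x) : _) 0,
    foldl_counts]
  have hperm : (PySem.List.sorted nums (fun x => x) false).Perm nums :=
    PySem.List.sorted_perm nums (fun x => x) false
  rw [hperm.countP_eq, hperm.countP_eq]
  simp
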